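-- pv_equiv track=rewrite | github.com/tangsenfei/AstrBot | docs/scripts/sync_docs_to_wiki.py | find_label_end
-- ===== SOURCE A (Python) =====
-- def find_label_end(content: str, label_start: int) -> int:
--     index = label_start + 1
--     while index < len(content):
--         close = content.find("]", index)
--         if close == -1:
--             return -1
--         if close > label_start and content[close - 1] == "\\":
--             index = close + 1
--             continue
--         lookahead = close + 1
--         while lookahead < len(content) and content[lookahead].isspace():
--             lookahead += 1
--         if lookahead < len(content) and content[lookahead] == "(":
--             return close
--         index = close + 1
--     return -1
-- ===== SOURCE B (Python) =====
-- def find_label_end(content: str, label_start: int) -> int: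
--     # Single left-to-right pass: a state machine that remembers the position of a
--     # pending unescaped "]" while skipping whitespace, instead of repeated find()
--     # calls with an inner lookahead loop.
--     pending = -1
--     for i in range(max(label_start + 1, 0), len(content)):
--         c = content[i]
--         if pending >= 0:
--             if c == "(":
--                 return pending
--             if c.isspace():
--                 continue
--             pending = -1
--         if c == "]" and not (i > 0 and content[i - 1] == "\\"):
--             pending = i
--     return -1
-- ===== Notes on version B (the rewrite author's own statement) =====
-- stated objective: alternative
-- what changed: Replaces the repeated str.find calls with an inner whitespace-lookahead loop by one single left-to-right pass: a state machine that carries the position of a pending unescaped ']' and resolves it when the next non-whitespace character is seen; Pre_ restricts to the natural domain 0 <= label_start (label_start is the index of the '[' opening the label), since for negative label_start A's find start and content[close-1] go through Python negative-index wraparound, which B does not mirror.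
-- outside the precondition, e.g. on find_label_end('] (x] (', -5): A returns 4, B returns 0
import Mathlib
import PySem

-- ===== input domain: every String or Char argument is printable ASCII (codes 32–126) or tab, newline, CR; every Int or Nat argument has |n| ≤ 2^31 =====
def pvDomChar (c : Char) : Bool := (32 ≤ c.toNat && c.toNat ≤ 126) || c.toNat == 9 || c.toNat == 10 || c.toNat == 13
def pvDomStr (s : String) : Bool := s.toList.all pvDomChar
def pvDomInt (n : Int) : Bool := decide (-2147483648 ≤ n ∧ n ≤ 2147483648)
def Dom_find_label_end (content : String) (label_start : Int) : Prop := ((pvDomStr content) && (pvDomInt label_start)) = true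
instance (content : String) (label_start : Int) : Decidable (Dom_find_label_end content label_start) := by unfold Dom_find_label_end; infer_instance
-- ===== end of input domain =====

-- B replaces A's repeated find calls + inner whitespace-lookahead loop by one single
-- left-to-right pass carrying the position of a pending unescaped ']' (a state machine).

-- ===== PORT A =====
-- inner loop: while lookahead < len(content) and content[lookahead].isspace(): lookahead += 1
def findLabelLookahead (cs : List Char) (la : Int) : Int :=
  if h : la < (cs.length : Int) ∧ PySem.Chars.isspace (PySem.List.pyGetD cs la ' ') = true then
    findLabelLookahead cs (la + 1)
  else la
termination_by ((cs.length : Int) - la).toNat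
decreasing_by omega

-- outer while loop; fuel only makes the recursion total (cs.length + 1 suffices, see proofs)
def findLabelLoop (cs : List Char) (labelStart : Int) (fuel : Nat) (index : Int) : Int :=
  match fuel with
  | 0 => -1
  | fuel + 1 =>
    if index < (cs.length : Int) then
      let close := PySem.Chars.findFrom cs [']'] index none
      if close = -1 then -1
      else if close > labelStart ∧ PySem.List.pyGetD cs (close - 1) ' ' = '\\' then
        findLabelLoop cs labelStart fuel (close + 1)
      else
        let lookahead := findLabelLookahead cs (close + 1)
        if lookahead < (cs.length : Int) ∧ PySem.List.pyGetD cs lookahead ' ' = '(' then close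
        else findLabelLoop cs labelStart fuel (close + 1)
    else -1

def find_label_end (content : String) (label_start : Int) : Int :=
  findLabelLoop content.toList label_start (content.toList.length + 1) (label_start + 1)

-- ===== PORT B =====
-- Source B's for-loop: one pass over the remaining characters, i is the current index,
-- pending the index of a candidate ']' awaiting '(' (-1 = none)
def altLoop (cs : List Char) (pending : Int) (i : Nat) (rest : List Char) : Int :=
  match rest with
  | [] => -1
  | c :: rs =>
    if 0 ≤ pending ∧ c = '(' then pending
    else if 0 ≤ pending ∧ PySem.Chars.isspace c = true then altLoop cs pending (i + 1) rs
    else if c = ']' ∧ ¬(0 < i ∧ PySem.List.pyGetD cs ((i : Int) - 1) ' ' = '\\') then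
      altLoop cs (i : Int) (i + 1) rs
    else altLoop cs (-1) (i + 1) rs

def find_label_end_alt (content : String) (label_start : Int) : Int :=
  let cs := content.toList
  let start := (max (label_start + 1) 0).toNat
  altLoop cs (-1) start (cs.drop start)

-- ===== PRECONDITION & SPEC =====
-- Pre_ restricts to the natural domain label_start ≥ 0 (label_start is the index of the '['
-- opening the label); for negative label_start A's find start and content[close-1] apply
-- Python's negative-index wraparound, which B does not mirror.
def Pre_find_label_end (content : String) (label_start : Int) : Prop := 0 ≤ label_start
instance (content : String) (label_start : Int) : Decidable (Pre_find_label_end content label_start) := by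
  unfold Pre_find_label_end; infer_instance

def pvWitness_find_label_end : String × Int := ("[ab] (x)", 0)

def Spec_find_label_end (content : String) (label_start : Int) (out : Int) : Prop :=
  out = find_label_end_alt content label_start
instance (content : String) (label_start : Int) (out : Int) : Decidable (Spec_find_label_end content label_start out) := by
  unfold Spec_find_label_end; infer_instance

-- ===== CLAIM (what is proved, stated in full; the proofs are below) =====
def Claim_equal_find_label_end : Prop :=
  ∀ (content : String) (label_start : Int), Dom_find_label_end content label_start →
    Pre_find_label_end content label_start →
    Spec_find_label_end content label_start (find_label_end content label_start)

-- ===== LEMMAS AND PROOFS =====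

-- reference: skip whitespace from j
def skipWs (cs : List Char) (j : Nat) : Nat :=
  if h : j < cs.length then
    (if PySem.Chars.isspace cs[j] = true then skipWs cs (j + 1) else j)
  else j
termination_by cs.length - j

-- reference: position j is a successful match (unescaped ']' followed by ws* '(')
def goodB (cs : List Char) (j : Nat) : Bool :=
  if h : j < cs.length then
    (cs[j] == ']') && !(decide (0 < j) && (cs.getD (j - 1) ' ' == '\\')) &&
      (decide (skipWs cs (j + 1) < cs.length) && (cs.getD (skipWs cs (j + 1)) ' ' == '('))
  else false

-- reference scan: first good position ≥ i, else -1
def scan (cs : List Char) (i : Nat) : Int :=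
  if i < cs.length then (if goodB cs i then (i : Int) else scan cs (i + 1)) else -1
termination_by cs.length - i

theorem skipWs_le (cs : List Char) (j : Nat) (hj : j ≤ cs.length) :
    j ≤ skipWs cs j ∧ skipWs cs j ≤ cs.length := by
  by_cases h : j < cs.length
  · by_cases hs : PySem.Chars.isspace cs[j] = true
    · have ih := skipWs_le cs (j + 1) (by omega)
      rw [skipWs, dif_pos h, if_pos hs]; omega
    · rw [skipWs, dif_pos h, if_neg hs]; omega
  · rw [skipWs, dif_neg h]; omega
termination_by cs.length - j


theorem skipWs_ws (cs : List Char) (j k : Nat) (h1 : j ≤ k) (h2 : k < skipWs cs j) :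
    PySem.Chars.isspace (cs.getD k ' ') = true := by
  by_cases h : j < cs.length
  · by_cases hs : PySem.Chars.isspace cs[j] = true
    · rw [skipWs, dif_pos h, if_pos hs] at h2
      rcases Nat.eq_or_lt_of_le h1 with rfl | hlt
      · simpa [List.getD, List.getElem?_eq_getElem h] using hs
      · exact skipWs_ws cs (j + 1) k hlt h2
    · rw [skipWs, dif_pos h, if_neg hs] at h2; omega
  · rw [skipWs, dif_neg h] at h2; omega
termination_by cs.length - j


theorem skipWs_stop (cs : List Char) (j : Nat) (h : skipWs cs j < cs.length) :
    PySem.Chars.isspace (cs.getD (skipWs cs j) ' ') = false := by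
  by_cases hj : j < cs.length
  · by_cases hs : PySem.Chars.isspace cs[j] = true
    · rw [skipWs, dif_pos hj, if_pos hs] at h ⊢
      exact skipWs_stop cs (j + 1) h
    · rw [skipWs, dif_pos hj, if_neg hs] at h ⊢
      simp only [Bool.not_eq_true] at hs
      simpa [List.getD, List.getElem?_eq_getElem hj] using hs
  · rw [skipWs, dif_neg hj] at h; omega
termination_by cs.length - j


theorem skipWs_of_ws_until (cs : List Char) (j k : Nat) (hjk : j ≤ k) (hk : k ≤ cs.length)
    (hws : ∀ m, j ≤ m → m < k → PySem.Chars.isspace (cs.getD m ' ') = true)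
    (hstop : k = cs.length ∨ PySem.Chars.isspace (cs.getD k ' ') = false) :
    skipWs cs j = k := by
  by_cases h : j < cs.length
  · by_cases hs : PySem.Chars.isspace cs[j] = true
    · rw [skipWs, dif_pos h, if_pos hs]
      rcases Nat.eq_or_lt_of_le hjk with rfl | hlt
      · rcases hstop with h' | h'
        · omega
        · rw [show cs.getD j ' ' = cs[j] by simp [List.getD, List.getElem?_eq_getElem h]] at h'
          rw [h'] at hs; cases hs
      · exact skipWs_of_ws_until cs (j + 1) k hlt hk (fun m hm1 hm2 => hws m (by omega) hm2) hstop
    · rw [skipWs, dif_pos h, if_neg hs]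
      rcases Nat.eq_or_lt_of_le hjk with rfl | hlt
      · rfl
      · have := hws j le_rfl hlt
        rw [show cs.getD j ' ' = cs[j] by simp [List.getD, List.getElem?_eq_getElem h]] at this
        exact absurd this hs
  · rw [skipWs, dif_neg h]
    rcases Nat.eq_or_lt_of_le hjk with rfl | hlt
    · rfl
    · have := hws j le_rfl hlt; omega
termination_by cs.length - j


theorem lookahead_eq_skipWs (cs : List Char) (j : Nat) :
    findLabelLookahead cs (j : Int) = (skipWs cs j : Int) := by
  by_cases h : j < cs.length
  · by_cases hs : PySem.Chars.isspace cs[j] = true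
    · rw [findLabelLookahead, dif_pos ⟨by exact_mod_cast h,
        by simpa [PySem.List.pyGetD_natCast, List.getD, List.getElem?_eq_getElem h] using hs⟩,
        skipWs, dif_pos h, if_pos hs,
        show (j : Int) + 1 = ((j + 1 : Nat) : Int) by push_cast; ring]
      exact lookahead_eq_skipWs cs (j + 1)
    · rw [findLabelLookahead, dif_neg, skipWs, dif_pos h, if_neg hs]
      rintro ⟨-, hc⟩
      exact hs (by simpa [PySem.List.pyGetD_natCast, List.getD, List.getElem?_eq_getElem h] using hc)
  · rw [findLabelLookahead, dif_neg, skipWs, dif_neg h]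
    rintro ⟨hc, -⟩
    exact h (by exact_mod_cast hc)
termination_by cs.length - j

theorem not_good_of_ne (cs : List Char) (m : Nat) (h : cs.getD m ' ' ≠ ']') :
    goodB cs m = false := by
  unfold goodB
  split
  · next hlt =>
      simp only [List.getD, List.getElem?_eq_getElem hlt, Option.getD_some] at h
      simp [h]
  · rfl

theorem goodB_iff (cs : List Char) (j : Nat) (hj : j < cs.length) :
    goodB cs j = true ↔
      (cs.getD j ' ' = ']' ∧ ¬(0 < j ∧ cs.getD (j - 1) ' ' = '\\') ∧
        (skipWs cs (j + 1) < cs.length ∧ cs.getD (skipWs cs (j + 1)) ' ' = '(')) := by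
  unfold goodB
  rw [dif_pos hj]
  simp [List.getD, List.getElem?_eq_getElem hj, Bool.and_eq_true, and_assoc]
  intro _ _ _
  constructor
  · rintro (rfl | h) h0
    · exact absurd h0 (lt_irrefl 0)
    · exact h
  · intro h
    rcases Nat.eq_zero_or_pos j with rfl | h0
    · exact Or.inl rfl
    · exact Or.inr (h h0)

theorem scan_skip (cs : List Char) (i j : Nat) (hij : i ≤ j) (hj : j ≤ cs.length)
    (h : ∀ m, i ≤ m → m < j → goodB cs m = false) : scan cs i = scan cs j := by
  rcases Nat.eq_or_lt_of_le hij with rfl | hlt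
  · rfl
  · rw [scan, if_pos (by omega), if_neg (by simp [h i le_rfl hlt])]
    exact scan_skip cs (i + 1) j hlt hj (fun m hm1 hm2 => h m (by omega) hm2)
termination_by j - i

theorem scan_out (cs : List Char) (i : Nat) (h : cs.length ≤ i) : scan cs i = -1 := by
  rw [scan, if_neg (by omega)]

theorem single_prefix_drop (cs : List Char) (m : Nat) (c : Char) :
    ([c] <+: cs.drop m) ↔ (m < cs.length ∧ cs.getD m ' ' = c) := by
  constructor
  · rintro ⟨t, ht⟩
    have hlen : m < cs.length := by
      have := congrArg List.length ht
      simp at this; omega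
    refine ⟨hlen, ?_⟩
    rw [List.drop_eq_getElem_cons hlen] at ht
    simp only [List.cons_append, List.cons.injEq] at ht
    simp [List.getD, List.getElem?_eq_getElem hlen, ht.1]
  · rintro ⟨hlen, hc⟩
    refine ⟨cs.drop (m + 1), ?_⟩
    rw [List.drop_eq_getElem_cons hlen]
    simp only [List.getD, List.getElem?_eq_getElem hlen, Option.getD_some] at hc
    simp [hc]

theorem findFrom_char (cs : List Char) (i : Nat) (hi : i ≤ cs.length) :
    (PySem.Chars.findFrom cs [']'] (i : Int) none = -1 ∧
      ∀ m, i ≤ m → m < cs.length → cs.getD m ' ' ≠ ']') ∨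
    (∃ j : Nat, PySem.Chars.findFrom cs [']'] (i : Int) none = (j : Int) ∧ i ≤ j ∧ j < cs.length ∧
      cs.getD j ' ' = ']' ∧ ∀ m, i ≤ m → m < j → cs.getD m ' ' ≠ ']') := by
  by_cases h : PySem.Chars.findFrom cs [']'] (i : Int) none = -1
  · left
    refine ⟨h, fun m him hmlen hc => ?_⟩
    rw [PySem.Chars.findFrom_natCast_eq_neg_one_iff cs [']'] i hi] at h
    have hpre : [']'] <+: (cs.drop i).drop (m - i) := by
      rw [List.drop_drop, show i + (m - i) = m by omega]
      exact (single_prefix_drop cs m ']').mpr ⟨hmlen, hc⟩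
    exact h (hpre.isInfix.trans (List.drop_suffix _ _).isInfix)
  · right
    obtain ⟨hk, hpre, hmin⟩ := PySem.Chars.findFrom_natCast_spec cs [']'] i hi h
    set r := PySem.Chars.findFrom cs [']'] (i : Int) none with hr
    obtain ⟨hjl, hj⟩ := (single_prefix_drop cs r.toNat ']').mp hpre
    refine ⟨r.toNat, by omega, by omega, hjl, hj, fun m him hmr hc => ?_⟩
    exact hmin m him hmr ((single_prefix_drop cs m ']').mpr ⟨by omega, hc⟩)

-- A's loop computes scan
theorem loopA_eq_scan (cs : List Char) (ls : Int) (fuel : Nat) (i : Nat)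
    (hls0 : 0 ≤ ls) (hls : ls < (i : Int)) (hfuel : cs.length + 2 ≤ fuel + i) :
    findLabelLoop cs ls fuel (i : Int) = scan cs i := by
  match fuel with
  | 0 =>
    rw [show findLabelLoop cs ls 0 (i : Int) = -1 from rfl, scan_out cs i (by omega)]
  | fuel + 1 =>
    rw [findLabelLoop]
    by_cases hi : (i : Int) < (cs.length : Int)
    · have hilen : i < cs.length := by exact_mod_cast hi
      rw [if_pos hi]
      rcases findFrom_char cs i (le_of_lt hilen) with ⟨hneg, hnone⟩ | ⟨j, hj, hij, hjlen, hjc, hnone⟩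
      · simp only [hneg]
        rw [if_pos trivial, scan_skip cs i cs.length (by omega) le_rfl
          (fun m hm1 hm2 => not_good_of_ne cs m (hnone m hm1 hm2)), scan_out cs cs.length le_rfl]
      · have hj1 : 1 ≤ j := by omega
        have hcast : (j : Int) - 1 = ((j - 1 : Nat) : Int) := by omega
        have hnotj : ∀ m, i ≤ m → m < j → goodB cs m = false :=
          fun m hm1 hm2 => not_good_of_ne cs m (hnone m hm1 hm2)
        simp only [hj]
        rw [if_neg (by omega)]
        by_cases hesc : cs.getD (j - 1) ' ' = '\\'
        · rw [if_pos ⟨by omega, by rw [hcast, PySem.List.pyGetD_natCast]; exact hesc⟩]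
          have hng : goodB cs j = false := by
            rw [Bool.eq_false_iff, Ne, goodB_iff cs j hjlen]
            rintro ⟨-, hne, -⟩; exact hne ⟨by omega, hesc⟩
          rw [scan_skip cs i (j + 1) (by omega) (by omega)
            (fun m hm1 hm2 => by rcases Nat.lt_succ_iff_lt_or_eq.mp hm2 with h | rfl
                                 exacts [hnotj m hm1 h, hng]),
            show (j : Int) + 1 = ((j + 1 : Nat) : Int) by omega]
          exact loopA_eq_scan cs ls fuel (j + 1) hls0 (by omega) (by omega)
        · rw [if_neg (by rintro ⟨-, hc⟩
                         rw [hcast, PySem.List.pyGetD_natCast] at hc; exact hesc hc)]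
          have hla : findLabelLookahead cs ((j : Int) + 1) = (skipWs cs (j + 1) : Int) := by
            rw [show (j : Int) + 1 = ((j + 1 : Nat) : Int) by omega]
            exact lookahead_eq_skipWs cs (j + 1)
          simp only [hla]
          by_cases hpar : skipWs cs (j + 1) < cs.length ∧ cs.getD (skipWs cs (j + 1)) ' ' = '('
          · rw [if_pos ⟨by exact_mod_cast hpar.1, by rw [PySem.List.pyGetD_natCast]; exact hpar.2⟩]
            have hg : goodB cs j = true :=
              (goodB_iff cs j hjlen).mpr ⟨hjc, fun h => hesc h.2, hpar⟩
            rw [scan_skip cs i j hij (by omega) hnotj, scan, if_pos hjlen, if_pos hg]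
          · rw [if_neg (by rintro ⟨h1, h2⟩
                           rw [PySem.List.pyGetD_natCast] at h2
                           exact hpar ⟨by exact_mod_cast h1, h2⟩)]
            have hng : goodB cs j = false := by
              rw [Bool.eq_false_iff, Ne, goodB_iff cs j hjlen]
              rintro ⟨-, -, hp⟩; exact hpar hp
            rw [scan_skip cs i (j + 1) (by omega) (by omega)
              (fun m hm1 hm2 => by rcases Nat.lt_succ_iff_lt_or_eq.mp hm2 with h | rfl
                                   exacts [hnotj m hm1 h, hng]),
              show (j : Int) + 1 = ((j + 1 : Nat) : Int) by omega]
            exact loopA_eq_scan cs ls fuel (j + 1) hls0 (by omega) (by omega)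
    · rw [if_neg hi, scan_out cs i (by exact_mod_cast not_lt.mp hi)]

-- B's loop computes scan
theorem loopB_eq_scan (cs : List Char) (rest : List Char) (i : Nat)
    (hrest : rest = cs.drop i) (hi : i ≤ cs.length) :
    (altLoop cs (-1) i rest = scan cs i) ∧
    (∀ p : Nat, p < i → cs.getD p ' ' = ']' →
      ¬(0 < p ∧ cs.getD (p - 1) ' ' = '\\') →
      (∀ m, p < m → m < i → PySem.Chars.isspace (cs.getD m ' ') = true) →
      altLoop cs (p : Int) i rest = scan cs p) := by
  have hcondEq : ∀ k : Nat, (0 < k ∧ PySem.List.pyGetD cs ((k : Int) - 1) ' ' = '\\') ↔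
      (0 < k ∧ cs.getD (k - 1) ' ' = '\\') := by
    intro k
    rcases Nat.eq_zero_or_pos k with rfl | hk
    · simp
    · rw [show (k : Int) - 1 = ((k - 1 : Nat) : Int) by omega, PySem.List.pyGetD_natCast]
  cases rest with
  | nil =>
    have hlen : cs.length ≤ i := List.drop_eq_nil_iff.mp hrest.symm
    constructor
    · show (-1 : Int) = scan cs i
      rw [scan_out cs i hlen]
    · intro p hp hp1 hp2 hws
      have hwsne : ∀ m, p < m → m < cs.length → cs.getD m ' ' ≠ ']' := by
        intro m h1 h2 hcontr
        have := hws m h1 (by omega)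
        rw [hcontr] at this
        exact absurd this (by decide)
      have hskip : skipWs cs (p + 1) = cs.length :=
        skipWs_of_ws_until cs (p + 1) cs.length (by omega) le_rfl
          (fun m h1 h2 => hws m (by omega) (by omega)) (Or.inl rfl)
      have hngp : goodB cs p = false := by
        rw [Bool.eq_false_iff, Ne, goodB_iff cs p (by omega)]
        rintro ⟨-, -, h3, -⟩
        rw [hskip] at h3
        exact absurd h3 (lt_irrefl _)
      show (-1 : Int) = scan cs p
      rw [scan_skip cs p cs.length (by omega) le_rfl
        (fun m h1 h2 => by
          rcases Nat.eq_or_lt_of_le h1 with rfl | hlt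
          · exact hngp
          · exact not_good_of_ne cs m (hwsne m hlt h2)),
        scan_out cs cs.length le_rfl]
  | cons c rs =>
    have hlen : i < cs.length := by
      have := congrArg List.length hrest
      simp at this
      omega
    rw [List.drop_eq_getElem_cons hlen] at hrest
    obtain ⟨hc, hrs⟩ : c = cs[i] ∧ rs = cs.drop (i + 1) := by
      injection hrest with h1 h2; exact ⟨h1, h2⟩
    have hci : cs.getD i ' ' = c := by
      simp [List.getD, List.getElem?_eq_getElem hlen, hc]
    have ihA := loopB_eq_scan cs rs (i + 1) hrs (by omega)
    have hstep : (if c = ']' ∧ ¬(0 < i ∧ PySem.List.pyGetD cs ((i : Int) - 1) ' ' = '\\') then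
        altLoop cs (i : Int) (i + 1) rs else altLoop cs (-1) (i + 1) rs) = scan cs i := by
      by_cases hcd : c = ']' ∧ ¬(0 < i ∧ cs.getD (i - 1) ' ' = '\\')
      · rw [if_pos ⟨hcd.1, fun hh => hcd.2 ((hcondEq i).mp hh)⟩]
        exact ihA.2 i (by omega) (by rw [hci, hcd.1]) hcd.2
          (fun m h1 h2 => absurd h2 (by omega))
      · rw [if_neg (fun hh => hcd ⟨hh.1, fun hh2 => hh.2 ((hcondEq i).mpr hh2)⟩)]
        have hng : goodB cs i = false := by
          rw [Bool.eq_false_iff, Ne, goodB_iff cs i hlen]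
          rintro ⟨h1, h2, -⟩
          rw [hci] at h1
          exact hcd ⟨h1, h2⟩
        rw [scan, if_pos hlen, if_neg (by simp [hng])]
        exact ihA.1
    constructor
    · rw [altLoop, if_neg (by rintro ⟨hh, -⟩; omega), if_neg (by rintro ⟨hh, -⟩; omega)]
      exact hstep
    · intro p hp hp1 hp2 hws
      rw [altLoop]
      by_cases hpar : c = '('
      · rw [if_pos ⟨Int.natCast_nonneg p, hpar⟩]
        have hskip : skipWs cs (p + 1) = i :=
          skipWs_of_ws_until cs (p + 1) i (by omega) (le_of_lt hlen)
            (fun m h1 h2 => hws m (by omega) h2)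
            (Or.inr (by rw [hci, hpar]; decide))
        have hg : goodB cs p = true :=
          (goodB_iff cs p (by omega)).mpr ⟨hp1, hp2, by rw [hskip]; exact ⟨hlen, by rw [hci, hpar]⟩⟩
        rw [scan, if_pos (by omega), if_pos hg]
      · by_cases hwsc : PySem.Chars.isspace c = true
        · rw [if_neg (fun hh => hpar hh.2), if_pos ⟨Int.natCast_nonneg p, hwsc⟩]
          exact ihA.2 p (by omega) hp1 hp2
            (fun m h1 h2 => by
              rcases Nat.lt_succ_iff_lt_or_eq.mp h2 with h | rfl
              · exact hws m h1 h
              · rw [hci]; exact hwsc)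
        · rw [if_neg (fun hh => hpar hh.2), if_neg (fun hh => hwsc hh.2)]
          have hskip : skipWs cs (p + 1) = i :=
            skipWs_of_ws_until cs (p + 1) i (by omega) (le_of_lt hlen)
              (fun m h1 h2 => hws m (by omega) h2)
              (Or.inr (by rw [hci]; exact Bool.not_eq_true _ ▸ hwsc))
          have hngp : goodB cs p = false := by
            rw [Bool.eq_false_iff, Ne, goodB_iff cs p (by omega)]
            rintro ⟨-, -, -, h4⟩
            rw [hskip, hci] at h4
            exact hpar h4
          have hwsne : ∀ m, p < m → m < i → cs.getD m ' ' ≠ ']' := by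
            intro m h1 h2 hcontr
            have := hws m h1 h2
            rw [hcontr] at this
            exact absurd this (by decide)
          rw [scan_skip cs p i (by omega) (le_of_lt hlen)
            (fun m h1 h2 => by
              rcases Nat.eq_or_lt_of_le h1 with rfl | hlt
              · exact hngp
              · exact not_good_of_ne cs m (hwsne m hlt h2))]
          exact hstep
termination_by cs.length - i

-- ===== VERDICT (by name: the statement is the Claim_ definition above) =====
theorem find_label_end_spec : Claim_equal_find_label_end := by
  unfold Claim_equal_find_label_end
  intro content ls hdom hpre
  unfold Spec_find_label_end find_label_end find_label_end_alt
  have hpre' : (0 : Int) ≤ ls := hpre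
  obtain ⟨i, hi1⟩ : ∃ i : Nat, ls + 1 = (i : Int) := ⟨(ls + 1).toNat, by omega⟩
  have hi0 : 1 ≤ i := by omega
  simp only [hi1]
  rw [show (max ((i : Int)) 0).toNat = i by omega]
  rw [loopA_eq_scan content.toList ls (content.toList.length + 1) i hpre' (by omega) (by omega)]
  by_cases hile : i ≤ content.toList.length
  · rw [(loopB_eq_scan content.toList (content.toList.drop i) i rfl hile).1]
  · rw [List.drop_eq_nil_of_le (by omega), scan_out content.toList i (by omega)]
    rfl
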